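-- pv_equiv track=rewrite | github.com/YunqiuXu/my_notes | UNSW/COMP9318/Project/submissionLRKNN.py | get_structure_and_vowels_LR
-- ===== SOURCE A (Python) =====
-- def get_structure_and_vowels_LR(removed_stress, vowel):
--     structure = ''
--     num_vowels = 0
--     count = 0
--     vowels = []
--     vowel_positions = []
--     for item in removed_stress[:]:
--         if item in vowel:
--             structure += 'V'
--             vowels.append(vowel.get(item))
--             vowel_positions.append(count)
--             num_vowels += 1
--             count += 1
--         else:
--             structure += 'C'
--             count += 1
--
--     return vowels, vowel_positions, num_vowels, structure
-- ===== SOURCE B (Python) =====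
-- def get_structure_and_vowels_LR(removed_stress, vowel):
--     # Build the C/V structure string first; every other output is then derived
--     # FROM the structure string itself rather than by re-testing membership:
--     # positions are the indices of 'V' characters, vowels are looked up by
--     # indexing back into removed_stress at those positions, and the count is
--     # just how many positions there are.
--     structure = ''.join('V' if item in vowel else 'C' for item in removed_stress)
--     vowel_positions = [i for i, ch in enumerate(structure) if ch == 'V']
--     vowels = [vowel[removed_stress[i]] for i in vowel_positions]
--     return vowels, vowel_positions, len(vowel_positions), structure
-- ===== Notes on version B (the rewrite author's own statement) =====
-- stated objective: alternative
-- what changed: Instead of one fused loop carrying five pieces of mutable state, B performs a single membership pass to build the structure string and then DERIVES the other outputs from that string: vowel_positions are the indices of 'V' characters of the structure, vowels are recovered by indexing removed_stress at those positions and looking each item up in the dict, and num_vowels is len(vowel_positions); the dict membership test is consulted in only one of the four computations.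
import Mathlib
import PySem

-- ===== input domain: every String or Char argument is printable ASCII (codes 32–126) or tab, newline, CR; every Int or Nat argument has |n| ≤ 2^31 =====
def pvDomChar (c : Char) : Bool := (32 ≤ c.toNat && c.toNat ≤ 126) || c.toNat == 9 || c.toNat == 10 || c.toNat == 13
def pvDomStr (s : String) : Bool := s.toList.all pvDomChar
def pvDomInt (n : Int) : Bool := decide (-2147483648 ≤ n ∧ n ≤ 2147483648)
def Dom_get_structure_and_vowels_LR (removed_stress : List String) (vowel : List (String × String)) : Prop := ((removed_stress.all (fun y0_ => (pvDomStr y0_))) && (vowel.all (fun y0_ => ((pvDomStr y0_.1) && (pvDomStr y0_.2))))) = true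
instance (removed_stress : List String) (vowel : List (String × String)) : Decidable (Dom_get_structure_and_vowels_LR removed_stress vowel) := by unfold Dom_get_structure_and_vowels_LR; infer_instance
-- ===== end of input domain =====

-- B builds only the structure string from the dict and derives the other three outputs
-- from that string (indices of 'V', indexing back into the list, length of the positions);
-- A computes all four at once in one fused loop (objective: alternative).

-- ===== PORT A =====
-- A's for-loop: state (vowels, vowel_positions, num_vowels, count, structure)
def goA (d : PySem.Dict String String) : List String → (List String × List Int × Int × Int × String) → (List String × List Int × Int × Int × String)
  | [], st => st
  | item :: rest, (vowels, positions, num, count, struct) =>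
    if d.contains item then
      goA d rest (vowels ++ [(d.get? item).getD ""], positions ++ [count], num + 1, count + 1, struct ++ "V")
    else
      goA d rest (vowels, positions, num, count + 1, struct ++ "C")

def get_structure_and_vowels_LR (removed_stress : List String) (vowel : List (String × String)) : List String × List Int × Int × String :=
  let d := PySem.Dict.ofList vowel
  let r := goA d removed_stress ([], [], 0, 0, "")
  (r.1, r.2.1, r.2.2.1, r.2.2.2.2)

-- ===== PORT B =====
-- vowel[removed_stress[i]] can never miss (position i carries a 'V'), so the
-- port's .getD "" defaults are unreachable; pyGetD's index is always in range.
def get_structure_and_vowels_LR_alt (removed_stress : List String) (vowel : List (String × String)) : List String × List Int × Int × String :=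
  let d := PySem.Dict.ofList vowel
  let struct := String.join (removed_stress.map (fun item => if d.contains item then "V" else "C"))
  let vowel_positions := ((PySem.List.enumerate struct.toList).filter (fun p => p.2 == 'V')).map (fun p => p.1)
  let vowels := vowel_positions.map (fun i => (d.get? (PySem.List.pyGetD removed_stress i "")).getD "")
  (vowels, vowel_positions, (vowel_positions.length : Int), struct)

-- ===== PRECONDITION & SPEC =====
def Spec_get_structure_and_vowels_LR (removed_stress : List String) (vowel : List (String × String)) (out : List String × List Int × Int × String) : Prop := out = get_structure_and_vowels_LR_alt removed_stress vowel
instance (removed_stress : List String) (vowel : List (String × String)) (out : List String × List Int × Int × String) : Decidable (Spec_get_structure_and_vowels_LR removed_stress vowel out) := by unfold Spec_get_structure_and_vowels_LR; infer_instance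

-- ===== CLAIM =====
def Claim_equal_get_structure_and_vowels_LR : Prop := ∀ (removed_stress : List String) (vowel : List (String × String)), Dom_get_structure_and_vowels_LR removed_stress vowel → Spec_get_structure_and_vowels_LR removed_stress vowel (get_structure_and_vowels_LR removed_stress vowel)

-- ===== LEMMAS AND PROOFS =====

theorem string_foldl_app (l : List String) (a b : String) :
    l.foldl (· ++ ·) (a ++ b) = a ++ l.foldl (· ++ ·) b := by
  induction l generalizing b with
  | nil => simp
  | cons s rest ih =>
    rw [List.foldl_cons, List.foldl_cons, String.append_assoc, ih]

theorem string_join_cons (s : String) (l : List String) :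
    String.join (s :: l) = s ++ String.join l := by
  simp only [String.join, List.foldl_cons]
  have : ("" : String) ++ s = s ++ "" := by simp
  rw [this, string_foldl_app]

-- characterisation of A's fused loop
theorem goA_eq (d : PySem.Dict String String) (rs : List String) :
    ∀ (vs : List String) (ps : List Int) (n c : Int) (st : String),
    goA d rs (vs, ps, n, c, st) =
      (vs ++ (rs.filter (fun i => d.contains i)).map (fun i => (d.get? i).getD ""),
       ps ++ ((PySem.List.enumerate rs c).filter (fun p => d.contains p.2)).map (fun p => p.1),
       n + ((rs.filter (fun i => d.contains i)).length : Int),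
       c + rs.length,
       st ++ String.join (rs.map (fun i => if d.contains i then "V" else "C"))) := by
  induction rs with
  | nil => intro vs ps n c st; simp [goA, PySem.List.enumerate_nil, String.join]
  | cons x rest ih =>
    intro vs ps n c st
    by_cases h : d.contains x = true
    · simp only [goA, h, List.filter_cons, PySem.List.enumerate_cons,
        List.map_cons, string_join_cons, if_true]
      rw [ih]
      simp only [Prod.mk.injEq, List.length_cons]
      refine ⟨by simp, by simp, by push_cast; ring, by push_cast; ring,
        by simp [String.append_assoc]⟩
    · simp only [goA, h, List.filter_cons, PySem.List.enumerate_cons,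
        List.map_cons, string_join_cons, if_false, Bool.false_eq_true]
      rw [ih]
      simp only [Prod.mk.injEq, List.length_cons]
      refine ⟨trivial, trivial, trivial, by push_cast; ring, by simp [String.append_assoc]⟩

-- the structure string's characters are the per-item C/V classification
theorem join_CV_toList (d : PySem.Dict String String) (rs : List String) :
    (String.join (rs.map (fun i => if d.contains i then "V" else "C"))).toList
      = rs.map (fun i => if d.contains i then 'V' else 'C') := by
  induction rs with
  | nil => simp [String.join]
  | cons x rest ih =>
    rw [List.map_cons, string_join_cons, List.map_cons]
    by_cases h : d.contains x = true <;> simp [h, ih]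

-- indices of 'V' in the structure string = indices of dict members in the list
theorem positions_eq (d : PySem.Dict String String) (rs : List String) :
    ∀ c : Int,
    ((PySem.List.enumerate (rs.map (fun i => if d.contains i then 'V' else 'C')) c).filter
        (fun p => p.2 == 'V')).map (fun p => p.1)
      = ((PySem.List.enumerate rs c).filter (fun p => d.contains p.2)).map (fun p => p.1) := by
  induction rs with
  | nil => intro c; simp [PySem.List.enumerate_nil]
  | cons x rest ih =>
    intro c
    by_cases h : d.contains x = true <;>
      simp [PySem.List.enumerate_cons, h, ih]

theorem filter_enum_length (q : String → Bool) (rs : List String) :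
    ∀ c : Int,
    (((PySem.List.enumerate rs c).filter (fun p => q p.2)).length : Int)
      = ((rs.filter q).length : Int) := by
  induction rs with
  | nil => intro c; simp [PySem.List.enumerate_nil]
  | cons x rest ih =>
    intro c
    by_cases h : q x = true <;>
      simp [PySem.List.enumerate_cons, h, ih]

-- looking up removed_stress at a 'V' position recovers the filtered items
theorem vowels_eq (d : PySem.Dict String String) (rs : List String)
    (g : String → String) :
    (((PySem.List.enumerate rs 0).filter (fun p => d.contains p.2)).map (fun p => p.1)).map
        (fun i => g (PySem.List.pyGetD rs i ""))
      = (rs.filter (fun i => d.contains i)).map g := by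
  rw [List.map_map]
  have h1 : ((PySem.List.enumerate rs 0).filter (fun p => d.contains p.2)).map
        ((fun i => g (PySem.List.pyGetD rs i "")) ∘ (fun p => p.1))
      = ((PySem.List.enumerate rs 0).filter (fun p => d.contains p.2)).map
        (fun p => g p.2) := by
    apply List.map_congr_left
    intro p hp
    have hmem : p ∈ PySem.List.enumerate rs 0 := List.mem_of_mem_filter hp
    rcases (PySem.List.mem_enumerate_iff rs 0 p).1 hmem with ⟨k, hk, rfl⟩
    simp [PySem.List.pyGetD_natCast, List.getD_eq_getElem?_getD, hk]
  rw [h1]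
  have h2 : ((PySem.List.enumerate rs 0).filter (fun p => d.contains p.2)).map
        (fun p => g p.2)
      = (((PySem.List.enumerate rs 0).filter (fun p => d.contains p.2)).map
          (fun p => p.2)).map g := by
    rw [List.map_map]; rfl
  rw [h2]
  congr 1
  have h3 : ((PySem.List.enumerate rs 0).map (fun p => p.2)).filter (fun i => d.contains i)
      = ((PySem.List.enumerate rs 0).filter (fun p => d.contains p.2)).map (fun p => p.2) := by
    rw [List.filter_map]; rfl
  rw [← h3, PySem.List.map_snd_enumerate]

-- ===== VERDICT =====
theorem get_structure_and_vowels_LR_spec : Claim_equal_get_structure_and_vowels_LR := by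
  intro rs vowel _
  unfold Spec_get_structure_and_vowels_LR get_structure_and_vowels_LR get_structure_and_vowels_LR_alt
  simp only [goA_eq, join_CV_toList, positions_eq, List.nil_append]
  refine Prod.ext ?_ (Prod.ext ?_ (Prod.ext ?_ ?_))
  · exact (vowels_eq _ rs _).symm
  · rfl
  · simpa using (filter_enum_length (fun i => (PySem.Dict.ofList vowel).contains i) rs 0).symm
  · rfl
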